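-- pv_equiv track=rewrite | github.com/accsc/pyiunstir | pyiunstir/encoding.py | break_syl
-- ===== SOURCE A (Python) =====
-- def break_syl(word):
--     """ Splits a word in elements taking into account the semisyllabic
--         nature of most of the iberian scripts (all letters but ka, ta, ba, etc.).
--
--         E.g. biderogan --> ['bi', 'de', 'r', 'o', 'ga', 'n']
--     """
--
--     output = []
--     word = word.strip().replace(" ", "")
--     for i, str_chr in enumerate(word):
--         if str_chr in ("k", "g", "d", "t", "b"):
--             output.append(str_chr)
--             if i < len(word) - 1 and (word[i + 1] not in ("a", "e", "i", "o", "u")):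
--                 output.append("e ")
--             elif i == len(word) - 1:
--                 output.append("e ")
--         else:
--             output.append(str_chr)
--             output.append(" ")
--     output = "".join(output).strip()
--     return output.split(" ")
-- ===== SOURCE B (Python) =====
-- def break_syl(word):
--     """ Splits a word in elements taking into account the semisyllabic
--         nature of most of the iberian scripts (all letters but ka, ta, ba, etc.).
--
--         E.g. biderogan --> ['bi', 'de', 'r', 'o', 'ga', 'n']
--     """
--     word = word.strip().replace(" ", "")
--     tokens = []
--     pending = ""
--     for c, nxt in zip(word, word[1:] + "\x00"):
--         if c in "kgdtb":
--             if nxt in "aeiou":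
--                 pending = c
--             else:
--                 tokens.append(pending + c + "e")
--                 pending = ""
--         else:
--             tokens.append(pending + c)
--             pending = ""
--     return tokens or [""]
-- ===== Notes on version B (the rewrite author's own statement) =====
-- stated objective: simpler
-- what changed: B builds the token list directly in a single pass with a pending-consonant accumulator instead of emitting a space-separated character stream, joining, stripping and splitting it.
import Mathlib
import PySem

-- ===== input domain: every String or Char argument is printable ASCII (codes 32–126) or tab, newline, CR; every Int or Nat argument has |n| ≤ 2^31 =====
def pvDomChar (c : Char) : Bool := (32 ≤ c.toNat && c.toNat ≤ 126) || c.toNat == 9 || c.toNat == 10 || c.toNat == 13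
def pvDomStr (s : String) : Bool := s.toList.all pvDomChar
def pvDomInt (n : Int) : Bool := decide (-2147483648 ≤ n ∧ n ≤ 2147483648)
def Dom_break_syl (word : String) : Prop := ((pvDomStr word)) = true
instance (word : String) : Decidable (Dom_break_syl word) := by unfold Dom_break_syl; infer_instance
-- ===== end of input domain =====

-- B builds the token list directly in one pass with a pending accumulator, instead of
-- emitting a space-separated character stream and splitting it (objective: simpler).

-- ===== PORT A =====
-- A's loop body (append the char; a stop consonant gets "e " unless a vowel follows; others get " ").
def breakStep (w : List Char) (output : List (List Char)) (p : Int × Char) : List (List Char) :=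
  if p.2 = 'k' ∨ p.2 = 'g' ∨ p.2 = 'd' ∨ p.2 = 't' ∨ p.2 = 'b' then
    let output := output ++ [[p.2]]
    -- word[i+1] is guarded in range by the first conjunct, so pyGetD's default is never read
    if p.1 < (w.length : Int) - 1 ∧
        ¬(PySem.List.pyGetD w (p.1 + 1) ' ' = 'a' ∨ PySem.List.pyGetD w (p.1 + 1) ' ' = 'e' ∨
          PySem.List.pyGetD w (p.1 + 1) ' ' = 'i' ∨ PySem.List.pyGetD w (p.1 + 1) ' ' = 'o' ∨
          PySem.List.pyGetD w (p.1 + 1) ' ' = 'u') then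
      output ++ [['e', ' ']]
    else if p.1 = (w.length : Int) - 1 then
      output ++ [['e', ' ']]
    else output
  else
    (output ++ [[p.2]]) ++ [[' ']]

def break_syl (word : String) : List String :=
  let w : List Char := PySem.Chars.replace (PySem.Chars.strip word.toList) [' '] []
  let output : List (List Char) := (PySem.List.enumerate w).foldl (breakStep w) []
  let out : List Char := PySem.Chars.strip (PySem.Chars.join [] output)
  (PySem.Chars.splitOn out [' ']).map String.ofList

-- ===== PORT B =====
-- B's loop body over (char, next char) pairs, state = (tokens so far, pending consonant).
def altStep (st : List (List Char) × List Char) (p : Char × Char) : List (List Char) × List Char :=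
  if p.1 = 'k' ∨ p.1 = 'g' ∨ p.1 = 'd' ∨ p.1 = 't' ∨ p.1 = 'b' then
    if p.2 = 'a' ∨ p.2 = 'e' ∨ p.2 = 'i' ∨ p.2 = 'o' ∨ p.2 = 'u' then
      (st.1, [p.1])
    else
      (st.1 ++ [st.2 ++ [p.1, 'e']], [])
  else
    (st.1 ++ [st.2 ++ [p.1]], [])

def break_syl_alt (word : String) : List String :=
  let w : List Char := PySem.Chars.replace (PySem.Chars.strip word.toList) [' '] []
  let st := (w.zip (PySem.List.slice w (some 1) none ++ ['\x00'])).foldl altStep ([], [])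
  match st.1 with
  | [] => [""]
  | ts => ts.map String.ofList

-- ===== PRECONDITION & SPEC =====
def Spec_break_syl (word : String) (out : List String) : Prop := out = break_syl_alt word
instance (word : String) (out : List String) : Decidable (Spec_break_syl word out) := by unfold Spec_break_syl; infer_instance

-- ===== CLAIM (what is proved, stated in full; the proofs are below) =====
def Claim_equal_break_syl : Prop := ∀ (word : String), Dom_break_syl word → Spec_break_syl word (break_syl word)

-- ===== LEMMAS AND PROOFS =====

def pvVowelHead : List Char → Bool
  | [] => false
  | n :: _ => n == 'a' || n == 'e' || n == 'i' || n == 'o' || n == 'u'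

def pvS : List Char → List Char
  | [] => []
  | c :: rest =>
    if c = 'k' ∨ c = 'g' ∨ c = 'd' ∨ c = 't' ∨ c = 'b' then
      if pvVowelHead rest then c :: pvS rest
      else c :: 'e' :: ' ' :: pvS rest
    else c :: ' ' :: pvS rest

def pvTok (p : List Char) : List Char → List (List Char)
  | [] => []
  | c :: rest =>
    if c = 'k' ∨ c = 'g' ∨ c = 'd' ∨ c = 't' ∨ c = 'b' then
      if pvVowelHead rest then pvTok [c] rest
      else (p ++ [c, 'e']) :: pvTok [] rest
    else (p ++ [c]) :: pvTok [] rest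

def pvJoin : List (List Char) → List Char
  | [] => []
  | [t] => t
  | t :: ts => t ++ ' ' :: pvJoin ts

theorem replace_go_filter (l : List Char) : ∀ (fuel : Nat) (acc : List Char), l.length ≤ fuel →
    PySem.Chars.replace.go [' '] [] fuel l acc = acc.reverse ++ l.filter (fun c => c ≠ ' ') := by
  induction l with
  | nil =>
    intro fuel acc _
    rcases fuel with _ | f <;> rw [PySem.Chars.replace.go] <;> simp
  | cons c t ih =>
    intro fuel acc hf
    rcases fuel with _ | f
    · simp at hf
    · rw [PySem.Chars.replace.go]
      simp only [List.isPrefixOf, Bool.and_true]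
      by_cases hc : c = ' '
      · subst hc
        simp only [beq_self_eq_true, if_pos, List.reverse_nil, List.nil_append]
        rw [show (List.drop [' '].length (' ' :: t)) = t by simp]
        rw [ih f acc (by simpa using hf)]
        simp
      · rw [if_neg (by simpa using fun h => hc h.symm)]
        rw [ih f (c :: acc) (by simpa using hf)]
        simp [hc]

def pvSplitAux : List Char → List Char → List (List Char)
  | [], cur => [cur.reverse]
  | c :: rest, cur => if c = ' ' then cur.reverse :: pvSplitAux rest [] else pvSplitAux rest (c :: cur)

theorem splitOn_go_eq : ∀ (l : List Char) (fuel : Nat) (cur : List Char) (acc : List (List Char)),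
    l.length ≤ fuel →
    PySem.Chars.splitOn.go [' '] fuel l cur acc = acc.reverse ++ pvSplitAux l cur := by
  intro l
  induction l with
  | nil =>
    intro fuel cur acc _
    rcases fuel with _ | f <;> rw [PySem.Chars.splitOn.go] <;> simp [pvSplitAux]
  | cons c t ih =>
    intro fuel cur acc hf
    rcases fuel with _ | f
    · simp at hf
    · rw [PySem.Chars.splitOn.go]
      simp only [List.isPrefixOf, Bool.and_true]
      by_cases hc : c = ' '
      · subst hc
        simp only [beq_self_eq_true, if_pos]
        rw [show (List.drop [' '].length (' ' :: t)) = t by simp]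
        rw [ih f [] (cur.reverse :: acc) (by simpa using hf)]
        simp [pvSplitAux]
      · rw [if_neg (by simpa using fun h => hc h.symm)]
        rw [ih f (c :: cur) acc (by simpa using hf)]
        simp [pvSplitAux, hc]

theorem splitOn_space (l : List Char) : PySem.Chars.splitOn l [' '] = pvSplitAux l [] := by
  rw [PySem.Chars.splitOn]
  rw [splitOn_go_eq l (l.length + 1) [] [] (by omega)]
  simp

theorem replace_space (s : List Char) :
    PySem.Chars.replace s [' '] [] = s.filter (fun c => c ≠ ' ') := by
  rw [PySem.Chars.replace]
  simp only [List.isEmpty_cons, if_neg Bool.false_ne_true]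
  rw [replace_go_filter s s.length [] le_rfl]
  simp

theorem join_nil_flatten (ts : List (List Char)) : PySem.Chars.join [] ts = ts.flatten := by
  rw [PySem.Chars.join]
  induction ts with
  | nil => simp [List.intercalate]
  | cons t ts ih =>
    cases ts with
    | nil => simp [List.intercalate]
    | cons t2 ts2 =>
      simp only [List.intercalate, List.intersperse] at *
      simp_all [List.flatten]

theorem head?_pvS (w : List Char) : (pvS w).head? = w.head? := by
  cases w with
  | nil => rfl
  | cons c rest => rw [pvS]; split_ifs <;> rfl

theorem lstrip_of_head (l : List Char)
    (h : ∀ c, l.head? = some c → PySem.Chars.isspace c = false) : PySem.Chars.lstrip l = l := by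
  cases l with
  | nil => rfl
  | cons a l => simp [PySem.Chars.lstrip, h a rfl]

theorem getLast?_prepend (c : Char) (T : List Char) (d : Char) (h : T.getLast? = some d) :
    (c :: T).getLast? = some d := by
  cases T with
  | nil => simp at h
  | cons a t => rw [List.getLast?_cons_cons]; exact h

theorem rstrip_append_space (T : List Char) (c : Char) (hc : T.getLast? = some c)
    (hs : PySem.Chars.isspace c = false) : PySem.Chars.rstrip (T ++ [' ']) = T := by
  rw [PySem.Chars.rstrip]
  rw [show (T ++ [' ']).reverse = ' ' :: T.reverse by simp]
  rw [List.dropWhile_cons]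
  rw [if_pos (by decide : PySem.Chars.isspace ' ' = true)]
  rcases hT : T.reverse with _ | ⟨a, r⟩
  · rw [List.reverse_eq_nil_iff] at hT; subst hT; simp at hc
  · have ha : a = c := by
      have h1 : T.reverse.head? = T.getLast? := List.head?_reverse
      rw [hT, hc] at h1
      simpa using h1
    subst ha
    rw [List.dropWhile_cons, if_neg (by simp [hs])]
    rw [← hT, List.reverse_reverse]

theorem pvS_structure (w : List Char)
    (hlast : ∀ c, w.getLast? = some c → PySem.Chars.isspace c = false) : w ≠ [] →
    ∃ T, pvS w = T ++ [' '] ∧ ∃ c, T.getLast? = some c ∧ PySem.Chars.isspace c = false := by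
  induction w with
  | nil => intro h; exact absurd rfl h
  | cons c rest ih =>
    intro _
    rcases rest with _ | ⟨r, rs⟩
    · rw [pvS]
      have hc : PySem.Chars.isspace c = false := hlast c rfl
      split_ifs with h1 h2
      · simp [pvVowelHead] at h2
      · exact ⟨[c, 'e'], by simp [pvS], 'e', rfl, by decide⟩
      · exact ⟨[c], by simp [pvS], c, rfl, hc⟩
    · have hlast' : ∀ x, (r :: rs).getLast? = some x → PySem.Chars.isspace x = false := by
        intro x hx
        exact hlast x (by rwa [List.getLast?_cons_cons])
      obtain ⟨T, hT, d, hd, hds⟩ := ih hlast' (by simp)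
      rw [pvS]
      split_ifs with h1 h2
      · exact ⟨c :: T, by simp [hT], d, getLast?_prepend _ _ _ hd, hds⟩
      · exact ⟨c :: 'e' :: ' ' :: T, by simp [hT], d, getLast?_prepend _ _ _ (getLast?_prepend _ _ _ (getLast?_prepend _ _ _ hd)), hds⟩
      · exact ⟨c :: ' ' :: T, by simp [hT], d, getLast?_prepend _ _ _ (getLast?_prepend _ _ _ hd), hds⟩

theorem pvSplitAux_token (t : List Char) (ht : ' ' ∉ t) :
    ∀ (l cur : List Char), pvSplitAux (t ++ l) cur = pvSplitAux l (t.reverse ++ cur) := by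
  induction t with
  | nil => intro l cur; simp
  | cons a t ih =>
    intro l cur
    have ha : a ≠ ' ' := fun h => ht (h ▸ List.mem_cons_self)
    rw [List.cons_append, pvSplitAux, if_neg ha, ih (fun h => ht (List.mem_cons_of_mem _ h))]
    simp

theorem pvSplitAux_join (ts : List (List Char)) (h : ∀ t ∈ ts, ' ' ∉ t) (hne : ts ≠ []) :
    pvSplitAux (pvJoin ts) [] = ts := by
  induction ts with
  | nil => exact absurd rfl hne
  | cons t ts ih =>
    cases ts with
    | nil =>
      rw [pvJoin, show t = t ++ [] by simp, pvSplitAux_token t (h t List.mem_cons_self)]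
      simp [pvSplitAux]
    | cons t2 ts2 =>
      rw [show pvJoin (t :: t2 :: ts2) = t ++ ' ' :: pvJoin (t2 :: ts2) from by rw [pvJoin]; simp]
      rw [pvSplitAux_token t (h t List.mem_cons_self)]
      rw [pvSplitAux, if_pos rfl]
      rw [ih (fun x hx => h x (List.mem_cons_of_mem _ hx)) (by simp)]
      simp

theorem pvTok_ne_nil (w : List Char) : w ≠ [] → ∀ p, pvTok p w ≠ [] := by
  induction w with
  | nil => intro h; exact absurd rfl h
  | cons c rest ih =>
    intro _ p
    rw [pvTok]
    split_ifs with h1 h2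
    · have hr : rest ≠ [] := by cases rest <;> simp [pvVowelHead] at h2 ⊢
      exact ih hr [c]
    · simp
    · simp

theorem pvTok_no_space (w : List Char) : ' ' ∉ w →
    ∀ p, ' ' ∉ p → ∀ t ∈ pvTok p w, ' ' ∉ t := by
  induction w with
  | nil => intro _ p _ t ht; simp [pvTok] at ht
  | cons c rest ih =>
    intro hw p hp t ht
    have hc : c ≠ ' ' := fun h => hw (h ▸ List.mem_cons_self)
    have hrest : ' ' ∉ rest := fun h => hw (List.mem_cons_of_mem _ h)
    rw [pvTok] at ht
    split_ifs at ht with h1 h2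
    · exact ih hrest [c] (by simp [Ne.symm hc]) t ht
    · rcases List.mem_cons.mp ht with rfl | ht
      · intro hmem
        rcases List.mem_append.mp hmem with h | h
        · exact hp h
        · simp at h; exact hc h.symm
      · exact ih hrest [] (by simp) t ht
    · rcases List.mem_cons.mp ht with rfl | ht
      · intro hmem
        rcases List.mem_append.mp hmem with h | h
        · exact hp h
        · simp at h; exact hc h.symm
      · exact ih hrest [] (by simp) t ht

theorem pvTok_flat (w : List Char) :
    ∀ p, (p = [] ∨ ∃ v rest, w = v :: rest ∧ (v = 'a' ∨ v = 'e' ∨ v = 'i' ∨ v = 'o' ∨ v = 'u')) →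
    (pvTok p w).flatMap (· ++ [' ']) = p ++ pvS w := by
  induction w with
  | nil =>
    intro p hp
    rcases hp with rfl | ⟨v, rest, h, _⟩
    · simp [pvTok, pvS]
    · simp at h
  | cons c rest ih =>
    intro p hp
    rw [pvTok, pvS]
    split_ifs with h1 h2
    · have hpnil : p = [] := by
        rcases hp with rfl | ⟨v, r, hvr, hv⟩
        · rfl
        · obtain ⟨rfl, rfl⟩ : v = c ∧ r = rest := by
            constructor <;> [exact (List.cons.injEq .. ▸ hvr).1.symm; exact (List.cons.injEq .. ▸ hvr).2.symm]
          rcases h1 with rfl | rfl | rfl | rfl | rfl <;> rcases hv with h | h | h | h | h <;> simp_all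
      subst hpnil
      have hrest : ∃ v r2, rest = v :: r2 ∧ (v = 'a' ∨ v = 'e' ∨ v = 'i' ∨ v = 'o' ∨ v = 'u') := by
        cases rest with
        | nil => simp [pvVowelHead] at h2
        | cons n r2 =>
          refine ⟨n, r2, rfl, ?_⟩
          simp [pvVowelHead] at h2
          tauto
      rw [ih [c] (Or.inr hrest)]
      simp
    · rw [List.flatMap_cons, ih [] (Or.inl rfl)]
      simp
    · rw [List.flatMap_cons, ih [] (Or.inl rfl)]
      simp

theorem flatMap_pvJoin (ts : List (List Char)) (hne : ts ≠ []) :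
    ts.flatMap (· ++ [' ']) = pvJoin ts ++ [' '] := by
  induction ts with
  | nil => exact absurd rfl hne
  | cons t ts ih =>
    cases ts with
    | nil => simp [pvJoin]
    | cons t2 ts2 =>
      rw [List.flatMap_cons, ih (by simp),
        show pvJoin (t :: t2 :: ts2) = t ++ ' ' :: pvJoin (t2 :: ts2) from by rw [pvJoin]; simp]
      simp

theorem loopA (w : List Char) : ∀ (u : List Char) (k : Nat) (out : List (List Char)),
    u = w.drop k →
    ((PySem.List.enumerate u (k : Int)).foldl (breakStep w) out).flatten = out.flatten ++ pvS u := by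
  intro u
  induction u with
  | nil => intro k out _; simp [PySem.List.enumerate_nil, pvS]
  | cons c rest ih =>
    intro k out hu
    have hk : k < w.length := by
      by_contra h
      rw [List.drop_eq_nil_of_le (by omega)] at hu
      simp at hu
    have hrest : rest = w.drop (k + 1) := by
      have := congrArg List.tail hu
      simpa [List.tail_drop] using this
    have hlr : rest.length = w.length - (k + 1) := by
      rw [hrest, List.length_drop]
    rw [PySem.List.enumerate_cons, List.foldl_cons,
      show ((k : Int) + 1) = ((k + 1 : Nat) : Int) by push_cast; ring,
      ih (k + 1) _ hrest, pvS]
    unfold breakStep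
    rcases hr : rest with _ | ⟨n, rs⟩
    · subst hr
      have hlen : k + 1 = w.length := by simp at hlr; omega
      rw [if_neg (show ¬ pvVowelHead ([] : List Char) = true by decide)]
      by_cases h1 : c = 'k' ∨ c = 'g' ∨ c = 'd' ∨ c = 't' ∨ c = 'b'
      · simp only [if_pos h1]
        rw [if_neg (fun h => absurd h.1 (by omega)), if_pos (by omega : (k : Int) = (w.length : Int) - 1)]
        simp [pvS]
      · simp only [if_neg h1]
        simp [pvS]
    · subst hr
      have hlen2 : k + 1 < w.length := by simp at hlr; omega
      have hn : PySem.List.pyGetD w ((k : Int) + 1) ' ' = n := by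
        rw [show ((k : Int) + 1) = ((k + 1 : Nat) : Int) by push_cast; ring,
          PySem.List.pyGetD_natCast]
        have hg : w[k+1]? = some n := by
          have h0 : (w.drop (k+1))[0]? = some n := by rw [← hrest]; rfl
          rwa [List.getElem?_drop, Nat.add_zero] at h0
        rw [List.getD_eq_getElem?_getD, hg]
        rfl
      by_cases hv : n = 'a' ∨ n = 'e' ∨ n = 'i' ∨ n = 'o' ∨ n = 'u'
      · rw [if_pos (show pvVowelHead (n :: rs) = true by simp [pvVowelHead]; tauto)]
        by_cases h1 : c = 'k' ∨ c = 'g' ∨ c = 'd' ∨ c = 't' ∨ c = 'b'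
        · simp only [if_pos h1]
          rw [if_neg (fun h => h.2 (by rw [hn]; exact hv)),
            if_neg (show ¬ ((k : Int) = (w.length : Int) - 1) by omega)]
          simp
        · simp only [if_neg h1]
          simp
      · rw [if_neg (show ¬ pvVowelHead (n :: rs) = true by simp [pvVowelHead]; tauto)]
        by_cases h1 : c = 'k' ∨ c = 'g' ∨ c = 'd' ∨ c = 't' ∨ c = 'b'
        · simp only [if_pos h1]
          rw [if_pos ⟨by omega, by rw [hn]; exact hv⟩]
          simp
        · simp only [if_neg h1]
          simp

theorem altStep_apply (toks : List (List Char)) (p : List Char) (c n : Char) :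
    altStep (toks, p) (c, n) =
      if c = 'k' ∨ c = 'g' ∨ c = 'd' ∨ c = 't' ∨ c = 'b' then
        if n = 'a' ∨ n = 'e' ∨ n = 'i' ∨ n = 'o' ∨ n = 'u' then (toks, [c])
        else (toks ++ [p ++ [c, 'e']], [])
      else (toks ++ [p ++ [c]], []) := rfl

theorem loopB (w : List Char) : ∀ (toks : List (List Char)) (p : List Char), w ≠ [] →
    ((w.zip (w.drop 1 ++ ['\x00'])).foldl altStep (toks, p)) = (toks ++ pvTok p w, []) := by
  induction w with
  | nil => intro _ _ h; exact absurd rfl h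
  | cons c rest ih =>
    intro toks p _
    rcases rest with _ | ⟨r, rs⟩
    · rw [pvTok]
      simp only [List.drop_one, List.tail_cons, List.nil_append, List.zip_cons_cons,
        List.zip_nil_right, List.foldl_cons, List.foldl_nil]
      rw [altStep_apply]
      rw [if_neg (show ¬('\x00' = 'a' ∨ '\x00' = 'e' ∨ '\x00' = 'i' ∨ '\x00' = 'o' ∨ '\x00' = 'u') by decide),
        if_neg (show ¬ pvVowelHead ([] : List Char) = true by decide)]
      by_cases h1 : c = 'k' ∨ c = 'g' ∨ c = 'd' ∨ c = 't' ∨ c = 'b'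
      · simp only [if_pos h1]; simp [pvTok]
      · simp only [if_neg h1]; simp [pvTok]
    · have hzip : ((c :: r :: rs).zip ((c :: r :: rs).drop 1 ++ ['\x00'])) =
          (c, r) :: ((r :: rs).zip ((r :: rs).drop 1 ++ ['\x00'])) := by
        simp
      rw [hzip, List.foldl_cons, altStep_apply]
      rw [pvTok]
      by_cases hv : r = 'a' ∨ r = 'e' ∨ r = 'i' ∨ r = 'o' ∨ r = 'u'
      · rw [if_pos (show pvVowelHead (r :: rs) = true by simp [pvVowelHead]; tauto)]
        by_cases h1 : c = 'k' ∨ c = 'g' ∨ c = 'd' ∨ c = 't' ∨ c = 'b'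
        · simp only [if_pos h1, if_pos hv]
          exact ih toks [c] (by simp)
        · simp only [if_neg h1]
          rw [ih (toks ++ [p ++ [c]]) [] (by simp)]
          simp
      · rw [if_neg (show ¬ pvVowelHead (r :: rs) = true by simp [pvVowelHead]; tauto)]
        by_cases h1 : c = 'k' ∨ c = 'g' ∨ c = 'd' ∨ c = 't' ∨ c = 'b'
        · simp only [if_pos h1, if_neg hv]
          rw [ih (toks ++ [p ++ [c, 'e']]) [] (by simp)]
          simp
        · simp only [if_neg h1]
          rw [ih (toks ++ [p ++ [c]]) [] (by simp)]
          simp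

theorem head?_filter_dropWhile (q : Char → Bool) (hq : ∀ x, PySem.Chars.isspace x = false → q x = true)
    (m : List Char) (c : Char)
    (h : ((List.dropWhile PySem.Chars.isspace m).filter q).head? = some c) :
    PySem.Chars.isspace c = false := by
  induction m with
  | nil => simp at h
  | cons a m ih =>
    rw [List.dropWhile_cons] at h
    split_ifs at h with ha
    · exact ih h
    · rw [Bool.not_eq_true] at ha
      rw [List.filter_cons, if_pos (hq a ha)] at h
      simp at h
      exact h ▸ ha

theorem rstrip_prefix (l : List Char) : PySem.Chars.rstrip l <+: l := by
  rw [PySem.Chars.rstrip]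
  obtain ⟨r, hr⟩ := List.dropWhile_suffix (p := PySem.Chars.isspace) (l := l.reverse)
  refine ⟨r.reverse, ?_⟩
  have := congrArg List.reverse hr
  simpa using this

theorem head?_of_prefix {t l : List Char} {c : Char} (h : t <+: l) (hc : t.head? = some c) :
    l.head? = some c := by
  obtain ⟨r, rfl⟩ := h
  cases t
  · simp at hc
  · simpa using hc

theorem hq_space : ∀ x : Char, PySem.Chars.isspace x = false → decide (x ≠ ' ') = true := by
  intro x hx
  simp only [decide_eq_true_eq]
  rintro rfl
  simp [show PySem.Chars.isspace ' ' = true from by decide] at hx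

theorem head?_filter_strip (s : List Char) (c : Char)
    (h : ((PySem.Chars.strip s).filter (fun c => c ≠ ' ')).head? = some c) :
    PySem.Chars.isspace c = false := by
  rw [PySem.Chars.strip] at h
  have hpre : (PySem.Chars.rstrip (PySem.Chars.lstrip s)).filter (fun c => decide (c ≠ ' ')) <+:
      (PySem.Chars.lstrip s).filter (fun c => decide (c ≠ ' ')) :=
    List.IsPrefix.filter _ (rstrip_prefix _)
  have h2 := head?_of_prefix hpre h
  rw [PySem.Chars.lstrip] at h2
  exact head?_filter_dropWhile _ hq_space s c h2

theorem getLast?_filter_strip (s : List Char) (c : Char)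
    (h : ((PySem.Chars.strip s).filter (fun c => c ≠ ' ')).getLast? = some c) :
    PySem.Chars.isspace c = false := by
  rw [← List.head?_reverse] at h
  rw [← List.filter_reverse] at h
  rw [PySem.Chars.strip, PySem.Chars.rstrip, List.reverse_reverse] at h
  exact head?_filter_dropWhile _ hq_space _ c h


theorem main_thm (word : String) : break_syl word = break_syl_alt word := by
  unfold break_syl break_syl_alt
  simp only [replace_space, PySem.List.slice_from_one]
  set t := PySem.Chars.strip word.toList with ht
  set w := t.filter (fun c => decide (c ≠ ' ')) with hwdef
  by_cases hnil : w = []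
  · rw [hnil]
    decide
  · set ts := pvTok [] w with hts_def
    have hA : ((PySem.List.enumerate w (0 : Int)).foldl (breakStep w) []).flatten = pvS w := by
      have := loopA w w 0 [] (by simp)
      simpa using this
    have hB := loopB w [] [] hnil
    rw [List.drop_one, List.nil_append] at hB
    have hts : ts ≠ [] := pvTok_ne_nil w hnil []
    have hflat : pvS w = pvJoin ts ++ [' '] := by
      have h1 := pvTok_flat w [] (Or.inl rfl)
      rw [List.nil_append, ← hts_def] at h1
      rw [← h1, flatMap_pvJoin ts hts]
    have hsp : ' ' ∉ w := by
      rw [hwdef]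
      simp [List.mem_filter]
    have htok : ∀ x ∈ ts, ' ' ∉ x := pvTok_no_space w hsp [] (by simp)
    have hhead : ∀ c, (pvS w).head? = some c → PySem.Chars.isspace c = false := by
      rw [head?_pvS]
      intro c hc
      exact head?_filter_strip word.toList c (by rw [← ht, ← hwdef]; exact hc)
    obtain ⟨T, hT, d, hTd, hTs⟩ := pvS_structure w
      (fun c hc => getLast?_filter_strip word.toList c (by rw [← ht, ← hwdef]; exact hc)) hnil
    have hTJ : T = pvJoin ts := by
      have h1 : T ++ [' '] = pvJoin ts ++ [' '] := by rw [← hT, hflat]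
      simpa using h1
    have hstrip : PySem.Chars.strip (pvS w) = pvJoin ts := by
      rw [PySem.Chars.strip, lstrip_of_head _ hhead, hT,
        rstrip_append_space T d hTd hTs, hTJ]
    have hsplit : PySem.Chars.splitOn (pvJoin ts) [' '] = ts := by
      rw [splitOn_space, pvSplitAux_join ts htok hts]
    rw [join_nil_flatten, hA, hstrip, hsplit, hB]
    cases hcase : ts with
    | nil => exact absurd hcase hts
    | cons a l =>
      rw [show pvTok [] w = a :: l from hts_def ▸ hcase]

-- ===== VERDICT (by name: the statement is the Claim_ definition above) =====
theorem break_syl_spec : Claim_equal_break_syl := by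
  intro word _
  unfold Spec_break_syl
  exact main_thm word
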